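-- pv_equiv track=rewrite | github.com/PeterVanNostrand/CSE469 | Assignment4/decisionTree.py | stopCriteria
-- ===== SOURCE A (Python) =====
-- def stopCriteria(dataSet):
--     '''
--     Criteria to stop splitting:
--     1) if all the class labels are the same, then return the class label;
--     2) if there are no more features to split, then return the majority label of the subset.
--
--     Parameters
--     -----------------
--     dataSet: 2-D list
--         [n_sampels, m_features + 1]
--         the last column is class label
--
--     Returns
--     ------------------
--     assignedLabel: string
--         if satisfying stop criteria, assignedLabel is the assigned class label;
--         else, assignedLabel is None
--     '''
--     # Count the frequency of all labels
--     label_freq = {}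
--     for sample in dataSet:
--         # Get the label of the sample
--         label = sample[-1]
--         # If its a novel label, start with frequency 0
--         if not (label in label_freq):
--             label_freq[label] = 0
--         # Increment the frequency
--         label_freq[label] += 1
--
--     # Find the most frequent label
--     max_freq = 0
--     assignedLabel = None
--     for label, freq in label_freq.items():
--         if freq > max_freq:
--             max_freq = freq
--             assignedLabel = label
--
--     # If there is theres more than one label and features to be split
--     if max_freq!=len(dataSet) and len(dataSet[0])>1:
--         assignedLabel = None
--
--     return assignedLabel
-- ===== SOURCE B (Python) =====
-- def stopCriteria(dataSet):
--     # Empty subset: nothing to decide.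
--     if not dataSet:
--         return None
--     # Unanimity short-circuit: all class labels equal -> that label.
--     first = dataSet[0][-1]
--     if all(sample[-1] == first for sample in dataSet):
--         return first
--     # Labels disagree; if features remain to split on, keep splitting.
--     if len(dataSet[0]) > 1:
--         return None
--     # No features left: majority label (first-appearance tie-break,
--     # since dict order is insertion order and max keeps the first maximum).
--     counts = {}
--     for sample in dataSet:
--         counts[sample[-1]] = counts.get(sample[-1], 0) + 1
--     return max(counts, key=counts.get)
-- ===== Notes on version B (the rewrite author's own statement) =====
-- stated objective: simpler
-- what changed: Replaced A's always-count-then-scan-dict flow by an early-return decomposition: a short-circuit unanimity check (returning immediately on the common all-same-label case), then the features-remain guard, and a majority count only in the rare no-features-left branch via max(counts, key=counts.get).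
import Mathlib
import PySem

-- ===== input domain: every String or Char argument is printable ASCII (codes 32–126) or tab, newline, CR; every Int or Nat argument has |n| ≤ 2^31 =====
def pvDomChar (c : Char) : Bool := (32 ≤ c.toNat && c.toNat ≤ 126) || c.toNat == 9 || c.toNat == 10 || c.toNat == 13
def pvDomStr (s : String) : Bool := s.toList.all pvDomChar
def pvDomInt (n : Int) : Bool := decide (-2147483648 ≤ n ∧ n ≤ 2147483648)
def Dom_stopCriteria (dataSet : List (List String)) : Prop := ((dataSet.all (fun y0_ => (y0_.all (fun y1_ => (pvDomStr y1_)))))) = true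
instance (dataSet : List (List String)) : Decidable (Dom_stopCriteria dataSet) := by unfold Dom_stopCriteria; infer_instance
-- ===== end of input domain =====

-- B re-decomposes A: early-return unanimity check, then the features-remain guard, and a
-- majority count only in the no-features-left branch; same return value everywhere in Pre_.

-- ===== PORT A =====
def stopCriteria (dataSet : List (List String)) : Option String :=
  -- Count the frequency of all labels
  let label_freq : PySem.Dict String Int :=
    dataSet.foldl (fun d sample =>
      let label := PySem.List.pyGetD sample (-1) ""
      let d := if d.contains label then d else d.insert label 0
      d.insert label (d.getD label 0 + 1)) PySem.Dict.empty
  -- Find the most frequent label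
  let st : Int × Option String :=
    label_freq.items.foldl (fun st p =>
      if p.2 > st.1 then (p.2, some p.1) else st) ((0 : Int), (none : Option String))
  -- If there is more than one label and features to be split
  if st.1 ≠ PySem.List.len dataSet ∧ PySem.List.len (PySem.List.pyGetD dataSet 0 []) > 1
  then none else st.2

-- ===== PORT B =====
def stopCriteria_alt (dataSet : List (List String)) : Option String :=
  if dataSet = [] then none
  else
    let first := PySem.List.pyGetD (PySem.List.pyGetD dataSet 0 []) (-1) ""
    if dataSet.all (fun sample => PySem.List.pyGetD sample (-1) "" == first) then some first
    else if PySem.List.len (PySem.List.pyGetD dataSet 0 []) > 1 then none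
    else
      let counts : PySem.Dict String Int :=
        dataSet.foldl (fun d sample =>
          d.insert (PySem.List.pyGetD sample (-1) "")
            (d.getD (PySem.List.pyGetD sample (-1) "") 0 + 1)) PySem.Dict.empty
      PySem.List.max? counts.keys (fun k => counts.getD k 0)

-- ===== PRECONDITION & SPEC =====
-- Pre_ excludes exactly the inputs where Python raises: sample[-1] is an IndexError on an empty row.
def Pre_stopCriteria (dataSet : List (List String)) : Prop := ∀ sample ∈ dataSet, sample ≠ []
instance (dataSet : List (List String)) : Decidable (Pre_stopCriteria dataSet) := by unfold Pre_stopCriteria; infer_instance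

def pvWitness_stopCriteria : List (List String) := [["a"], ["b"], ["a"]]

def Spec_stopCriteria (dataSet : List (List String)) (out : Option String) : Prop := out = stopCriteria_alt dataSet
instance (dataSet : List (List String)) (out : Option String) : Decidable (Spec_stopCriteria dataSet out) := by unfold Spec_stopCriteria; infer_instance

-- ===== CLAIM (what is proved, stated in full; the proofs are below) =====
def Claim_equal_stopCriteria : Prop := ∀ (dataSet : List (List String)), Dom_stopCriteria dataSet → Pre_stopCriteria dataSet → Spec_stopCriteria dataSet (stopCriteria dataSet)

-- ===== LEMMAS AND PROOFS =====

-- A's guarded increment is exactly one Counter step.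
theorem stepA_eq_modify (d : PySem.Dict String Int) (l : String) :
    (let d' := if d.contains l then d else d.insert l 0;
     d'.insert l (d'.getD l 0 + 1)) = d.modify l 0 (· + 1) := by
  by_cases h : d.contains l = true
  · simp [h, PySem.Dict.modify]
  · have hg : d.getD l 0 = 0 := by
      have : d.get? l = none := by
        rw [PySem.Dict.get?_eq_none_iff_not_mem_keys]
        intro hm
        rw [PySem.Dict.contains_eq_decide_mem_keys] at h
        simp [hm] at h
      simp [PySem.Dict.getD, this]
    simp only [Bool.not_eq_true] at h
    simp [h, PySem.Dict.modify, PySem.Dict.insert_insert_self, hg]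

-- the pick fold (keep-first running argmax) that both extremal computations reduce to
def pvPick (key : String → Int) (b : String) (t : List String) : String :=
  t.foldl (fun m y => if key m < key y then y else m) b

theorem pvPick_mem (key : String → Int) : ∀ (t : List String) (b : String), pvPick key b t ∈ b :: t := by
  intro t
  induction t with
  | nil => intro b; simp [pvPick]
  | cons y t ih =>
    intro b
    simp only [pvPick, List.foldl_cons]
    by_cases h : key b < key y
    · rw [if_pos h]
      exact List.mem_cons_of_mem b (ih y)
    · rw [if_neg h]
      have hb := ih b
      simp only [pvPick] at hb
      rcases List.mem_cons.mp hb with h' | h'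
      · rw [h']; exact List.mem_cons_self
      · exact List.mem_cons_of_mem b (List.mem_cons_of_mem y h')

theorem scan_from_some (key : String → Int) : ∀ (t : List String) (b : String),
    t.foldl (fun (st : Int × Option String) k =>
      if key k > st.1 then (key k, some k) else st) (key b, some b)
    = (key (pvPick key b t), some (pvPick key b t)) := by
  intro t
  induction t with
  | nil => intro b; simp [pvPick]
  | cons y t ih =>
    intro b
    simp only [List.foldl_cons, pvPick]
    by_cases h : key b < key y
    · rw [if_pos h, if_pos h]
      exact ih y
    · rw [if_neg h, if_neg h]
      exact ih b

theorem max?_from_some (key : String → Int) : ∀ (t : List String) (b : String),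
    PySem.List.max? (b :: t) key = some (pvPick key b t) := by
  intro t
  induction t with
  | nil => intro b; simp [PySem.List.max?, pvPick]
  | cons y t ih =>
    intro b
    simp only [PySem.List.max?, List.foldl_cons, pvPick] at ih ⊢
    by_cases h : key b < key y <;> simp [h, ih]

theorem scan_max (key : String → Int) (ks : List String) (hne : ks ≠ [])
    (hpos : ∀ k ∈ ks, 0 < key k) :
    ∃ r, r ∈ ks ∧
      ks.foldl (fun (st : Int × Option String) k =>
        if key k > st.1 then (key k, some k) else st) ((0 : Int), (none : Option String))
        = (key r, some r) ∧
      PySem.List.max? ks key = some r := by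
  cases ks with
  | nil => exact absurd rfl hne
  | cons b t =>
    refine ⟨pvPick key b t, pvPick_mem key t b, ?_, max?_from_some key t b⟩
    have h0 : key b > (0 : Int) := hpos b (by simp)
    simp only [List.foldl_cons, if_pos h0]
    exact scan_from_some key t b

-- Both ports build Counter(labels) where labels = [sample[-1] for sample in dataSet].
theorem foldA_eq_counter (dataSet : List (List String)) :
    dataSet.foldl (fun d sample =>
      let label := PySem.List.pyGetD sample (-1) ""
      let d := if d.contains label then d else d.insert label 0
      d.insert label (d.getD label 0 + 1)) PySem.Dict.empty
    = PySem.Dict.counter (dataSet.map (fun s => PySem.List.pyGetD s (-1) "")) := by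
  rw [PySem.Dict.counter, List.foldl_map]
  congr 1
  funext d s
  exact stepA_eq_modify d (PySem.List.pyGetD s (-1) "")

theorem foldB_eq_counter (dataSet : List (List String)) :
    dataSet.foldl (fun d sample =>
      d.insert (PySem.List.pyGetD sample (-1) "")
        (d.getD (PySem.List.pyGetD sample (-1) "") 0 + 1)) PySem.Dict.empty
    = PySem.Dict.counter (dataSet.map (fun s => PySem.List.pyGetD s (-1) "")) := by
  rw [PySem.Dict.counter, List.foldl_map]
  rfl

theorem stopCriteria_eq_alt (dataSet : List (List String)) :
    stopCriteria dataSet = stopCriteria_alt dataSet := by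
  cases dataSet with
  | nil => decide
  | cons h t =>
    rw [stopCriteria, stopCriteria_alt]
    simp only [foldA_eq_counter, foldB_eq_counter, PySem.Dict.items_counter,
      PySem.Dict.keys_counter, List.foldl_map, PySem.List.pyGetD_zero_cons,
      List.cons_ne_nil, if_false]
    set L : List String := List.map (fun s => PySem.List.pyGetD s (-1) "") (h :: t) with hL
    have hfirstL : PySem.List.pyGetD h (-1) "" ∈ L := by
      rw [hL]; exact List.mem_map_of_mem (by simp)
    obtain ⟨r, hrmem, hscan, hmax⟩ := scan_max (fun k => ((L.count k : Int))) (PySem.Set.ofList L)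
      (by
        intro he
        have hmem : PySem.List.pyGetD h (-1) "" ∈ PySem.Set.ofList L :=
          (PySem.Set.mem_ofList L _).mpr hfirstL
        rw [he] at hmem
        simp at hmem)
      (by
        intro k hk
        rw [PySem.Set.mem_ofList] at hk
        have := List.count_pos_iff.mpr hk
        simpa using this)
    rw [hscan]
    simp only []
    have hrL : r ∈ L := (PySem.Set.mem_ofList L r).mp hrmem
    have hlenL : L.length = (h :: t).length := by rw [hL]; simp
    by_cases hu : ((h :: t).all fun sample =>
        PySem.List.pyGetD sample (-1) "" == PySem.List.pyGetD h (-1) "") = true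
    · -- unanimous labels: A's max count is the sample count, so A keeps the label too
      have hall : ∀ x ∈ L, x = PySem.List.pyGetD h (-1) "" := by
        intro x hx
        rw [hL, List.mem_map] at hx
        obtain ⟨s, hs, rfl⟩ := hx
        have := List.all_eq_true.mp hu s hs
        simpa using this
      have hr : r = PySem.List.pyGetD h (-1) "" := hall r hrL
      have hcount : L.count r = L.length :=
        List.count_eq_length.mpr (fun b hb => hr.trans (hall b hb).symm)
      rw [if_pos hu, if_neg]
      · rw [hr]
      · intro hc
        exact hc.1 (by rw [hcount, hlenL, PySem.List.len_eq])
    · -- labels disagree: A's max count is strictly below the sample count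
      have hne : (↑(List.count r L) : Int) ≠ PySem.List.len (h :: t) := by
        intro hceq
        apply hu
        rw [PySem.List.len_eq] at hceq
        have h1 : L.count r = (h :: t).length := by exact_mod_cast hceq
        have hallr : ∀ b ∈ L, r = b := List.count_eq_length.mp (by rw [h1, hlenL])
        have hrfirst : r = PySem.List.pyGetD h (-1) "" := hallr _ hfirstL
        rw [List.all_eq_true]
        intro s hs
        have hx : r = PySem.List.pyGetD s (-1) "" :=
          hallr _ (by rw [hL]; exact List.mem_map_of_mem hs)
        simp [← hx, ← hrfirst]
      rw [if_neg hu]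
      by_cases hw : PySem.List.len h > 1
      · rw [if_pos ⟨hne, hw⟩, if_pos hw]
      · rw [if_neg (fun hc => hw hc.2), if_neg hw, ← hmax]
        congr 1
        funext k
        simp [PySem.Dict.getD_counter]

-- ===== VERDICT (by name: the statement is the Claim_ definition above) =====
theorem stopCriteria_spec : Claim_equal_stopCriteria := by
  intro dataSet _ _
  exact stopCriteria_eq_alt dataSet
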